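-- pv_equiv track=rewrite | github.com/Brosax/D_RD | vendor/plugins/code_analyzer/scanner/file_parser.py | _remove_multi_line_comments
-- ===== SOURCE A (Python) =====
-- def _remove_multi_line_comments(content: str) -> str:
--     """Remove /* */ style comments."""
--     result = []
--     i = 0
--     in_comment = False
--     while i < len(content):
--         if content[i] == "/" and i + 1 < len(content):
--             if content[i+1] == "*" and not in_comment:
--                 in_comment = True
--                 i += 2
--                 continue
--             elif content[i+1] == "*" and in_comment:
--                 if i + 2 < len(content) and content[i+2] == "/":
--                     in_comment = False
--                     i += 3
--                     continue
--         if not in_comment: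
--             result.append(content[i])
--         i += 1
--     return "".join(result)
-- ===== SOURCE B (Python) =====
-- def _remove_multi_line_comments(content: str) -> str:
--     """Remove /* */ style comments (close delimiter is '/*/', as in the original)."""
--     parts = []
--     rest = content
--     while True:
--         start = rest.find('/*')
--         if start == -1:
--             parts.append(rest)
--             break
--         parts.append(rest[:start])
--         end = rest.find('/*/', start + 2)
--         if end == -1:
--             break
--         rest = rest[end + 3:]
--     return ''.join(parts)
-- ===== Notes on version B (the rewrite author's own statement) =====
-- stated objective: faster
-- what changed: Replaced the per-character scan with an in_comment flag by a delimiter-jump loop: str.find locates the next comment opening and the next (unusual, three-character) closing delimiter, and whole slices between comments are collected and joined.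
import Mathlib
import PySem

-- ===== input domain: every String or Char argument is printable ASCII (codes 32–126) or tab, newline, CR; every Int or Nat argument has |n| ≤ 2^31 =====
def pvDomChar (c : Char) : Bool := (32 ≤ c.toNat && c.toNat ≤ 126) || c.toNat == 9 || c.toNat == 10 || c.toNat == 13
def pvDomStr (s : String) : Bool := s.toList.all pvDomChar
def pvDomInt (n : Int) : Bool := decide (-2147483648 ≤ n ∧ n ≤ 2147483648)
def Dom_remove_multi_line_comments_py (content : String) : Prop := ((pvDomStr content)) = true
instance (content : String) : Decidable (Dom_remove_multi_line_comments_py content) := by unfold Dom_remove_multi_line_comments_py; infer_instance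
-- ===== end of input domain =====

-- B replaces A's per-character scan with an in_comment flag by a delimiter-jump loop
-- built on str.find over string slices (objective: simpler/idiomatic; same behaviour,
-- including the '/*/' close delimiter and dropping the tail of an unterminated comment).


-- ===== PORT A =====
-- A's while loop over indices i with an in_comment flag, as a recursion over the
-- remaining characters (content[i], content[i+1], content[i+2] = the first chars of cs).
def pvLoopA : List Char → Bool → List Char
  | [], _ => []
  | [c], inc => if inc then [] else [c]          -- content[i]=='/' test can't open: i+1 >= len
  | c :: d :: rest, inc =>
    if c = '/' ∧ d = '*' then
      if inc then
        if rest ≠ [] ∧ rest.headI = '/' then pvLoopA rest.tail false  -- close "/*/": i += 3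
        else pvLoopA (d :: rest) true            -- fall through: no append (in comment), i += 1
      else pvLoopA rest true                     -- open "/*": i += 2
    else (if inc then [] else [c]) ++ pvLoopA (d :: rest) inc  -- append iff not in comment; i += 1
termination_by cs _ => cs.length
decreasing_by all_goals (simp [List.length_tail]; try omega)

def remove_multi_line_comments_py (content : String) : String :=
  String.ofList (pvLoopA content.toList false)       -- "".join(result)

-- ===== PORT B =====
-- Source B's while True loop: find '/*' in the remaining suffix, keep the part before it,
-- find the close '/*/' from start+2, continue after end+3 (or stop).
def pvLoopB (rest : List Char) : List Char :=
  let start := PySem.Chars.find rest ['/', '*']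
  if hs : start = -1 then rest                   -- parts.append(rest); break
  else
    let e := PySem.Chars.findFrom rest ['/', '*', '/'] (start + 2) none
    if e = -1 then PySem.List.slice rest none (some start)   -- parts.append(rest[:start]); break
    else PySem.List.slice rest none (some start)
         ++ pvLoopB (PySem.List.slice rest (some (e + 3)) none)   -- rest = rest[end+3:]
termination_by rest.length
decreasing_by
  have h2 : ['/', '*'] <:+: rest := (PySem.Chars.find_ne_neg_one_iff rest ['/', '*']).mp hs
  have hge : (0:ℤ) ≤ PySem.Chars.find rest ['/', '*'] := (PySem.Chars.find_nonneg_iff rest ['/', '*']).mpr h2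
  have hspec := PySem.Chars.find_spec hge
  have hk : (PySem.Chars.find rest ['/', '*']).toNat + 2 ≤ rest.length := by
    have := hspec.1.length_le
    simp at this
    omega
  have hcast : PySem.Chars.find rest ['/', '*'] + 2 = (((PySem.Chars.find rest ['/', '*']).toNat + 2 : ℕ) : ℤ) := by omega
  rename_i he
  have he' : PySem.Chars.findFrom rest ['/', '*', '/'] (((PySem.Chars.find rest ['/', '*']).toNat + 2 : ℕ) : ℤ) ≠ -1 := by
    rw [← hcast]; exact he
  have hesp := PySem.Chars.findFrom_natCast_spec rest ['/', '*', '/'] _ hk he'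
  have hke : (2:ℤ) ≤ PySem.Chars.findFrom rest ['/', '*', '/'] (PySem.Chars.find rest ['/', '*'] + 2) := by
    rw [hcast]; exact le_trans (by omega) hesp.1
  have hnn : (0:ℤ) ≤ PySem.Chars.findFrom rest ['/', '*', '/'] (PySem.Chars.find rest ['/', '*'] + 2) + 3 := by omega
  rw [PySem.List.slice_from rest hnn]
  simp only [List.length_drop]
  have hlen2 : 2 ≤ rest.length := by simpa using h2.length_le
  omega

def remove_multi_line_comments_py_alt (content : String) : String :=
  String.ofList (pvLoopB content.toList)             -- ''.join(parts)

-- ===== PRECONDITION & SPEC =====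
def Spec_remove_multi_line_comments_py (content : String) (out : String) : Prop := out = remove_multi_line_comments_py_alt content
instance (content : String) (out : String) : Decidable (Spec_remove_multi_line_comments_py content out) := by unfold Spec_remove_multi_line_comments_py; infer_instance

-- ===== CLAIM (what is proved, stated in full; the proofs are below) =====
def Claim_equal_remove_multi_line_comments_py : Prop := ∀ (content : String), Dom_remove_multi_line_comments_py content → Spec_remove_multi_line_comments_py content (remove_multi_line_comments_py content)

-- ===== LEMMAS AND PROOFS =====

-- Canonical mutual specification: outS = outside comment, inS = inside comment.
mutual
def outS : List Char → List Char
  | [] => []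
  | [c] => [c]
  | c :: d :: rest => if c = '/' ∧ d = '*' then inS rest else c :: outS (d :: rest)
  termination_by cs => cs.length
def inS : List Char → List Char
  | [] => []
  | [_] => []
  | [_, _] => []
  | c :: d :: e :: rest => if c = '/' ∧ d = '*' ∧ e = '/' then outS rest else inS (d :: e :: rest)
  termination_by cs => cs.length
end

theorem pvLoopA_eq_spec : ∀ cs : List Char, pvLoopA cs false = outS cs ∧ pvLoopA cs true = inS cs := by
  have H : ∀ n, ∀ cs : List Char, cs.length ≤ n →
      (pvLoopA cs false = outS cs ∧ pvLoopA cs true = inS cs) := by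
    intro n
    induction n with
    | zero =>
      intro cs hl
      match cs with
      | [] => simp [pvLoopA, outS, inS]
      | _ :: _ => simp at hl
    | succ n ih =>
      intro cs hl
      match cs with
      | [] => simp [pvLoopA, outS, inS]
      | [c] => simp [pvLoopA, outS, inS]
      | c :: d :: rest =>
        simp only [List.length_cons] at hl
        by_cases hcd : c = '/' ∧ d = '*'
        · obtain ⟨hc, hd⟩ := hcd
          subst hc; subst hd
          constructor
          · rw [show pvLoopA ('/' :: '*' :: rest) false = pvLoopA rest true from by
              simp [pvLoopA]]
            rw [show outS ('/' :: '*' :: rest) = inS rest from by simp [outS]]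
            exact (ih rest (by omega)).2
          · match rest with
            | [] =>
              simp [pvLoopA, inS]
            | e :: rest' =>
              by_cases he : e = '/'
              · subst he
                rw [show pvLoopA ('/' :: '*' :: '/' :: rest') true = pvLoopA rest' false from by
                  simp [pvLoopA]]
                rw [show inS ('/' :: '*' :: '/' :: rest') = outS rest' from by simp [inS]]
                exact (ih rest' (by simp at hl; omega)).1
              · rw [show pvLoopA ('/' :: '*' :: e :: rest') true = pvLoopA ('*' :: e :: rest') true from by
                  simp [pvLoopA, he]]
                rw [show inS ('/' :: '*' :: e :: rest') = inS ('*' :: e :: rest') from by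
                  simp [inS, he]]
                exact (ih ('*' :: e :: rest') (by simp at hl ⊢; omega)).2
        · have h1 : pvLoopA (c :: d :: rest) false = c :: pvLoopA (d :: rest) false := by
            simp [pvLoopA, hcd]
          have h2 : pvLoopA (c :: d :: rest) true = pvLoopA (d :: rest) true := by
            simp [pvLoopA, hcd]
          have h3 : outS (c :: d :: rest) = c :: outS (d :: rest) := by simp [outS, hcd]
          have h4 : inS (c :: d :: rest) = inS (d :: rest) := by
            match rest with
            | [] => simp [inS]
            | e :: rest' =>
              have : ¬ (c = '/' ∧ d = '*' ∧ e = '/') := fun ⟨a, b, _⟩ => hcd ⟨a, b⟩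
              simp [inS, this]
          have := ih (d :: rest) (by simp; omega)
          exact ⟨by rw [h1, h3, this.1], by rw [h2, h4, this.2]⟩
  intro cs; exact H cs.length cs le_rfl

theorem outS_of_no_open : ∀ (cs : List Char), ¬ (['/', '*'] <:+: cs) → outS cs = cs := by
  have H : ∀ n, ∀ cs : List Char, cs.length ≤ n → ¬ (['/', '*'] <:+: cs) → outS cs = cs := by
    intro n
    induction n with
    | zero =>
      intro cs hl _
      match cs with
      | [] => simp [outS]
      | _ :: _ => simp at hl
    | succ n ih =>
      intro cs hl h
      match cs with
      | [] => simp [outS]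
      | [c] => simp [outS]
      | c :: d :: rest =>
        rw [List.infix_cons_iff] at h
        push_neg at h
        obtain ⟨h0, h1⟩ := h
        have hcd : ¬ (c = '/' ∧ d = '*') := by
          rintro ⟨rfl, rfl⟩
          exact h0 ⟨rest, rfl⟩
        rw [show outS (c :: d :: rest) = c :: outS (d :: rest) from by simp [outS, hcd]]
        rw [ih (d :: rest) (by simp at hl ⊢; omega) h1]
  intro cs; exact H cs.length cs le_rfl

theorem inS_of_no_close : ∀ (cs : List Char), ¬ (['/', '*', '/'] <:+: cs) → inS cs = [] := by
  have H : ∀ n, ∀ cs : List Char, cs.length ≤ n → ¬ (['/', '*', '/'] <:+: cs) → inS cs = [] := by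
    intro n
    induction n with
    | zero =>
      intro cs hl _
      match cs with
      | [] => simp [inS]
      | _ :: _ => simp at hl
    | succ n ih =>
      intro cs hl h
      match cs with
      | [] => simp [inS]
      | [c] => simp [inS]
      | [c, d] => simp [inS]
      | c :: d :: e :: rest =>
        rw [List.infix_cons_iff] at h
        push_neg at h
        obtain ⟨h0, h1⟩ := h
        have hcd : ¬ (c = '/' ∧ d = '*' ∧ e = '/') := by
          rintro ⟨rfl, rfl, rfl⟩
          exact h0 ⟨rest, rfl⟩
        rw [show inS (c :: d :: e :: rest) = inS (d :: e :: rest) from by simp [inS, hcd]]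
        exact ih (d :: e :: rest) (by simp at hl ⊢; omega) h1
  intro cs; exact H cs.length cs le_rfl

theorem outS_of_first_open : ∀ (s : Nat) (cs : List Char),
    ['/', '*'] <+: cs.drop s → (∀ i < s, ¬ ['/', '*'] <+: cs.drop i) →
    outS cs = cs.take s ++ inS (cs.drop (s + 2)) := by
  intro s
  induction s with
  | zero =>
    intro cs hp _
    match cs with
    | [] => exact absurd hp.length_le (by simp only [List.length_drop, List.length_cons, List.length_nil]; omega)
    | [c] => exact absurd hp.length_le (by simp only [List.length_drop, List.length_cons, List.length_nil]; omega)
    | c :: d :: rest =>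
      simp only [List.drop_zero, List.cons_prefix_cons] at hp
      obtain ⟨rfl, rfl, -⟩ := hp
      simp [outS]
  | succ s ihs =>
    intro cs hp hmin
    match cs with
    | [] => exact absurd hp.length_le (by simp only [List.length_drop, List.length_cons, List.length_nil]; omega)
    | [c] => exact absurd hp.length_le (by simp only [List.length_drop, List.length_cons, List.length_nil]; omega)
    | c :: d :: rest =>
      have h0 : ¬ ['/', '*'] <+: (c :: d :: rest) := by simpa using hmin 0 (by omega)
      have hcd : ¬ (c = '/' ∧ d = '*') := by
        rintro ⟨rfl, rfl⟩
        exact h0 ⟨rest, rfl⟩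
      rw [show outS (c :: d :: rest) = c :: outS (d :: rest) from by simp [outS, hcd]]
      rw [ihs (d :: rest) (by simpa using hp)
        (fun i hi => by simpa using hmin (i + 1) (by omega))]
      rw [show List.take (s + 1) (c :: d :: rest) = c :: List.take s (d :: rest) from rfl]
      rw [show s + 1 + 2 = (s + 2) + 1 by omega, List.drop_succ_cons]
      simp

theorem inS_of_first_close : ∀ (j : Nat) (cs : List Char),
    ['/', '*', '/'] <+: cs.drop j → (∀ i < j, ¬ ['/', '*', '/'] <+: cs.drop i) →
    inS cs = outS (cs.drop (j + 3)) := by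
  intro j
  induction j with
  | zero =>
    intro cs hp _
    match cs with
    | [] => exact absurd hp.length_le (by simp only [List.length_drop, List.length_cons, List.length_nil]; omega)
    | [c] => exact absurd hp.length_le (by simp only [List.length_drop, List.length_cons, List.length_nil]; omega)
    | [c, d] => exact absurd hp.length_le (by simp only [List.length_drop, List.length_cons, List.length_nil]; omega)
    | c :: d :: e :: rest =>
      simp only [List.drop_zero, List.cons_prefix_cons] at hp
      obtain ⟨rfl, rfl, rfl, -⟩ := hp
      simp [inS]
  | succ j ihj =>
    intro cs hp hmin
    match cs with
    | [] => exact absurd hp.length_le (by simp only [List.length_drop, List.length_cons, List.length_nil]; omega)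
    | [c] => exact absurd hp.length_le (by simp only [List.length_drop, List.length_cons, List.length_nil]; omega)
    | [c, d] => exact absurd hp.length_le (by simp only [List.length_drop, List.length_cons, List.length_nil]; omega)
    | c :: d :: e :: rest =>
      have h0 : ¬ ['/', '*', '/'] <+: (c :: d :: e :: rest) := by simpa using hmin 0 (by omega)
      have hcd : ¬ (c = '/' ∧ d = '*' ∧ e = '/') := by
        rintro ⟨rfl, rfl, rfl⟩
        exact h0 ⟨rest, rfl⟩
      rw [show inS (c :: d :: e :: rest) = inS (d :: e :: rest) from by simp [inS, hcd]]
      rw [ihj (d :: e :: rest) (by simpa using hp)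
        (fun i hi => by simpa using hmin (i + 1) (by omega))]
      rw [show j + 1 + 3 = (j + 3) + 1 from by omega, List.drop_succ_cons]
      rfl

theorem pvLoopB_eq_spec : ∀ cs : List Char, pvLoopB cs = outS cs := by
  have H : ∀ n, ∀ cs : List Char, cs.length ≤ n → pvLoopB cs = outS cs := by
    intro n
    induction n with
    | zero =>
      intro cs hl
      match cs with
      | [] =>
        have hf : PySem.Chars.find [] ['/', '*'] = -1 :=
          (PySem.Chars.find_eq_neg_one_iff _ _).mpr (by simp)
        rw [pvLoopB, dif_pos hf]
        simp [outS]
      | _ :: _ => simp at hl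
    | succ n ih =>
      intro cs hl
      rw [pvLoopB]
      by_cases hfind : PySem.Chars.find cs ['/', '*'] = -1
      · rw [dif_pos hfind]
        exact (outS_of_no_open cs ((PySem.Chars.find_eq_neg_one_iff cs ['/', '*']).mp hfind)).symm
      · rw [dif_neg hfind]
        have h2 : ['/', '*'] <:+: cs := (PySem.Chars.find_ne_neg_one_iff cs ['/', '*']).mp hfind
        have hge : (0:ℤ) ≤ PySem.Chars.find cs ['/', '*'] :=
          (PySem.Chars.find_nonneg_iff cs ['/', '*']).mpr h2
        have hspec := PySem.Chars.find_spec hge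
        set s : ℕ := (PySem.Chars.find cs ['/', '*']).toNat with hs_def
        have hk : s + 2 ≤ cs.length := by
          have := hspec.1.length_le
          simp only [List.length_drop, List.length_cons, List.length_nil] at this
          omega
        have hopen : outS cs = cs.take s ++ inS (cs.drop (s + 2)) :=
          outS_of_first_open s cs hspec.1 hspec.2
        have hcast : PySem.Chars.find cs ['/', '*'] + 2 = ((s + 2 : ℕ) : ℤ) := by
          simp only [hs_def]; omega
        have hff := PySem.Chars.findFrom_natCast cs ['/', '*', '/'] (s + 2) hk
        have htake : PySem.List.slice cs none (some (PySem.Chars.find cs ['/', '*'])) = cs.take s :=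
          PySem.List.slice_to cs hge
        by_cases hcl : PySem.Chars.find (cs.drop (s + 2)) ['/', '*', '/'] = -1
        · have he : PySem.Chars.findFrom cs ['/', '*', '/'] (PySem.Chars.find cs ['/', '*'] + 2) = -1 := by
            rw [hcast, hff, if_pos hcl]
          rw [if_pos he, htake, hopen,
            inS_of_no_close _ ((PySem.Chars.find_eq_neg_one_iff _ ['/', '*', '/']).mp hcl)]
          simp
        · have hgej : (0:ℤ) ≤ PySem.Chars.find (cs.drop (s + 2)) ['/', '*', '/'] :=
            (PySem.Chars.find_nonneg_iff _ _).mpr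
              ((PySem.Chars.find_ne_neg_one_iff _ _).mp hcl)
          set j : ℕ := (PySem.Chars.find (cs.drop (s + 2)) ['/', '*', '/']).toNat with hj_def
          have hjspec := PySem.Chars.find_spec hgej
          have he : PySem.Chars.findFrom cs ['/', '*', '/'] (PySem.Chars.find cs ['/', '*'] + 2)
              = ((s + 2 + j : ℕ) : ℤ) := by
            rw [hcast, hff, if_neg hcl]
            push_cast
            omega
          have hene : PySem.Chars.findFrom cs ['/', '*', '/'] (PySem.Chars.find cs ['/', '*'] + 2) ≠ -1 := by
            rw [he]
            intro hx
            omega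
          rw [if_neg hene]
          have hslice : PySem.List.slice cs
              (some (PySem.Chars.findFrom cs ['/', '*', '/'] (PySem.Chars.find cs ['/', '*'] + 2) + 3)) none
              = cs.drop (s + 2 + j + 3) := by
            rw [he, show ((s + 2 + j : ℕ) : ℤ) + 3 = ((s + 2 + j + 3 : ℕ) : ℤ) from by push_cast; ring]
            rw [PySem.List.slice_from cs (by exact_mod_cast Int.natCast_nonneg _)]
            congr 1
          rw [htake, hslice]
          have hlen2 : 2 ≤ cs.length := by
            have := h2.length_le
            simpa using this
          rw [ih (cs.drop (s + 2 + j + 3)) (by simp only [List.length_drop]; omega)]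
          rw [hopen]
          congr 1
          rw [inS_of_first_close j (cs.drop (s + 2)) hjspec.1 hjspec.2]
          congr 1
          rw [List.drop_drop]
          congr 1
  intro cs; exact H cs.length cs le_rfl

-- ===== VERDICT (by name: the statement is the Claim_ definition above) =====
theorem remove_multi_line_comments_py_spec : Claim_equal_remove_multi_line_comments_py := by
  intro content _
  unfold Spec_remove_multi_line_comments_py remove_multi_line_comments_py remove_multi_line_comments_py_alt
  rw [(pvLoopA_eq_spec content.toList).1, pvLoopB_eq_spec]
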